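-- pv_equiv track=rewrite | github.com/AlexGascon/Tuenti-Challenge-2017 | Challenge 4/challenge4.py | check_triangles
-- ===== SOURCE A (Python) =====
-- def check_if_triangle(a, b, c):
--     """
--     Checks if we can create a triangle with the given sides.
--
--     The parameters represent the length of each of the sizes of the hypothetical triangle.
--     Returns True or False depending on if we can create a triangle or not.
--
--     To check if we can create a triangle with the given sides, we need that the sum of any pair of sides is greater than
--     the remaining one.
--     """
--     if (a + b) > c and (a + c) > b and (b + c) > a:
--         return True
--     else:
--         return False
--
-- def min_perimeter(perimeters):
--     """
--     Gets a list of numbers and returns the smallest one.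
--
--     We use it to find the minimum perimeter in a list of possible triangle perimeters
--     """
--     if perimeters:
--         if len(perimeters) > 1:
--             return min(perimeters)
--         else:
--             # We can't execute min in a one-element array
--             return perimeters[0]
--     else:
--         return None
--
-- def check_triangles(sides):
--     """
--     Gets a *sorted* list of sides and returns the perimeter of the smallest triangle we can form with them.
--     """
--     perimeters = []
--     for i in range(0, len(sides)):
--         for j in range(i+1, len(sides)-1):
--             # A VERY important part of the calculations is that the longest side must be the sucessor of the second
--             # longest, as we're searching for the smallest triangle. If we needed a longest side, then we wouldn't have
--             # the smallest possible triangle.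
--             # This assumption allows us to reduce the problem complexity from O(^3) to O(n^2)
--             a, b, c = sides[i], sides[j], sides[j+1]
--             if check_if_triangle(a, b, c):
--                 perimeter = a + b + c
--                 perimeters.append(perimeter)
--                 # As the sides array is sorted, if we keep iterating we'll only get bigger triangles. Therefore, we can
--                 # advance to the next iteration of the outer loop.
--                 break
--
--     return min_perimeter(perimeters)
-- ===== SOURCE B (Python) =====
-- def check_triangles(sides):
--     # Sweep the consecutive pairs left-to-right, maintaining the set of sides not
--     # yet matched ("alive"); each side is claimed by the first pair whose triangle
--     # interval (|c-b|, b+c) contains it, and the answer is the minimum matched perimeter.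
--     alive = []
--     found = []
--     for j in range(1, len(sides) - 1):
--         alive.append(sides[j - 1])
--         lo = abs(sides[j + 1] - sides[j])
--         hi = sides[j] + sides[j + 1]
--         found += [a + hi for a in alive if lo < a < hi]
--         alive = [a for a in alive if not (lo < a < hi)]
--     return min(found) if found else None
-- ===== Notes on version B (the rewrite author's own statement) =====
-- stated objective: alternative
-- what changed: B inverts A's loop nest: instead of scanning, per side, the consecutive pairs to its right until the first valid triangle, B makes one left-to-right sweep over the consecutive pairs maintaining the set of not-yet-matched sides, matching every alive side whose value lies in the pair's interval (|c-b|, b+c) and collecting those perimeters, then takes the minimum.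
import Mathlib
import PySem

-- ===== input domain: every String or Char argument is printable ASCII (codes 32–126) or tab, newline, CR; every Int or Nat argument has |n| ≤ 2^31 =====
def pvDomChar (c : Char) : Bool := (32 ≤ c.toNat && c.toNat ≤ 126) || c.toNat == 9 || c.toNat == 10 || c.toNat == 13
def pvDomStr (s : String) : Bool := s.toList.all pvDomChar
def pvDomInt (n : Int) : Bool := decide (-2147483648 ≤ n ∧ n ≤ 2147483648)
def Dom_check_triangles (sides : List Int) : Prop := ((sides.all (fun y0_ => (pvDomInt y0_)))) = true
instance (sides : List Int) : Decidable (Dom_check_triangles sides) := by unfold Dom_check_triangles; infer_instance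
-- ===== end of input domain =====

-- B replaces A's per-side rightward scans by a single left-to-right sweep over the
-- consecutive pairs that maintains the set of not-yet-matched sides; same return value
-- on every input (alternative decomposition, same asymptotic cost).

-- ===== PORT A =====
def check_if_triangle (a b c : Int) : Bool :=
  if a + b > c ∧ a + c > b ∧ b + c > a then true else false

def min_perimeter (perimeters : List Int) : Option Int :=
  if perimeters ≠ [] then
    if (perimeters.length : Int) > 1 then PySem.List.min? perimeters (fun x => x)
    else PySem.List.pyGet? perimeters 0   -- perimeters[0]; list is nonempty here, so no IndexError
  else none

-- the inner 'for j in range(i+1, len(sides)-1)' loop with its break (first valid j wins);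
-- indices i, j, j+1 are always in range in A, so the default 0 of pyGetD is never used
def check_triangles_inner (sides : List Int) (i : Int) : List Int → Option Int
  | [] => none
  | j :: js =>
    let a := PySem.List.pyGetD sides i 0
    let b := PySem.List.pyGetD sides j 0
    let c := PySem.List.pyGetD sides (j + 1) 0
    if check_if_triangle a b c then some (a + b + c)
    else check_triangles_inner sides i js

def check_triangles (sides : List Int) : Option Int :=
  let n : Int := (sides.length : Int)
  let perimeters := (PySem.List.pyRange 0 n 1).foldl
    (fun acc i =>
      match check_triangles_inner sides i (PySem.List.pyRange (i + 1) (n - 1) 1) with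
      | some p => acc ++ [p]
      | none => acc) []
  min_perimeter perimeters

-- ===== PORT B =====
-- the body of B's 'for j in range(1, len(sides) - 1)' loop over the state (alive, found)
def bStep (sides : List Int) (st : List Int × List Int) (j : Int) : List Int × List Int :=
  let alive := st.1 ++ [PySem.List.pyGetD sides (j - 1) 0]
  let lo := |PySem.List.pyGetD sides (j + 1) 0 - PySem.List.pyGetD sides j 0|
  let hi := PySem.List.pyGetD sides j 0 + PySem.List.pyGetD sides (j + 1) 0
  let found := st.2 ++ (alive.filter (fun a => decide (lo < a) && decide (a < hi))).map (fun a => a + hi)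
  (alive.filter (fun a => !(decide (lo < a) && decide (a < hi))), found)

def check_triangles_alt (sides : List Int) : Option Int :=
  let st := (PySem.List.pyRange 1 ((sides.length : Int) - 1) 1).foldl (bStep sides) ([], [])
  if st.2 ≠ [] then PySem.List.min? st.2 (fun x => x) else none

-- ===== PRECONDITION & SPEC =====
def Spec_check_triangles (sides : List Int) (out : Option Int) : Prop := out = check_triangles_alt sides
instance (sides : List Int) (out : Option Int) : Decidable (Spec_check_triangles sides out) := by unfold Spec_check_triangles; infer_instance

-- ===== CLAIM (what is proved, stated in full; the proofs are below) =====
def Claim_equal_check_triangles : Prop := ∀ (sides : List Int), Dom_check_triangles sides → Spec_check_triangles sides (check_triangles sides)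

-- ===== LEMMAS AND PROOFS =====

-- the consecutive pairs (lo, hi) = (|c-b|, b+c) A's inner loop walks
def prL (sides : List Int) : List (Int × Int) :=
  ((sides.drop 1).zip (sides.drop 2)).map (fun bc => (|bc.2 - bc.1|, bc.1 + bc.2))

-- first pair (lo, hi) with lo < a < hi gives a + hi
def ct_scan (a : Int) : List (Int × Int) → Option Int
  | [] => none
  | p :: rest => if p.1 < a ∧ a < p.2 then some (a + p.2) else ct_scan a rest

-- side i's scan restricted to the pairs before index k
def scanT (sides : List Int) (k i : Nat) : Option Int :=
  ct_scan (sides.getD i 0) (((prL sides).drop i).take (k - i))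

-- perimeters matched within the first k pairs / sides still alive after k pairs
def Pk (sides : List Int) (k : Nat) : List Int :=
  (List.range k).filterMap (scanT sides k)

def ALk (sides : List Int) (k : Nat) : List Int :=
  ((List.range k).filter (fun i => (scanT sides k i).isNone)).map (fun i => sides.getD i 0)

theorem prL_length (sides : List Int) : (prL sides).length = sides.length - 2 := by
  simp [prL]; omega

theorem prL_getElem (sides : List Int) (k : Nat) (hk : k < (prL sides).length) :
    (prL sides)[k] =
      (|sides[k + 2]'(by have := prL_length sides; omega) -
         sides[k + 1]'(by have := prL_length sides; omega)|,
       sides[k + 1]'(by have := prL_length sides; omega) +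
         sides[k + 2]'(by have := prL_length sides; omega)) := by
  have hl := prL_length sides
  simp [prL, List.getElem_zip, List.getElem_drop, Nat.add_comm]

theorem ct_scan_append (a : Int) (l : List (Int × Int)) (p : Int × Int) :
    ct_scan a (l ++ [p]) =
      (match ct_scan a l with
       | some x => some x
       | none => if p.1 < a ∧ a < p.2 then some (a + p.2) else none) := by
  induction l with
  | nil => simp [ct_scan]
  | cons q t ih =>
    by_cases h : q.1 < a ∧ a < q.2 <;> simp [ct_scan, h, ih]

theorem scanT_self (sides : List Int) (k : Nat) : scanT sides k k = none := by
  simp [scanT, ct_scan]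

theorem scanT_full (sides : List Int) (k i : Nat) (h : (prL sides).length ≤ k) :
    scanT sides k i = ct_scan (sides.getD i 0) ((prL sides).drop i) := by
  unfold scanT
  rw [List.take_of_length_le (by simp; omega)]

theorem scanT_succ (sides : List Int) (k i : Nat) (hk : k < (prL sides).length) (hi : i ≤ k) :
    scanT sides (k + 1) i =
      (match scanT sides k i with
       | some x => some x
       | none =>
         if (prL sides)[k].1 < sides.getD i 0 ∧ sides.getD i 0 < (prL sides)[k].2 then
           some (sides.getD i 0 + (prL sides)[k].2)
         else none) := by
  unfold scanT
  have h1 : k + 1 - i = (k - i) + 1 := by omega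
  have h2 : ((prL sides).drop i).take ((k - i) + 1)
      = ((prL sides).drop i).take (k - i) ++ [(prL sides)[k]] := by
    rw [List.take_add_one]
    have : ((prL sides).drop i)[k - i]? = some (prL sides)[k] := by
      rw [List.getElem?_drop, show i + (k - i) = k by omega,
        List.getElem?_eq_getElem hk]
    rw [this]; rfl
  rw [h1, h2, ct_scan_append]

-- one element appended to the alive list
theorem ALk_snoc (sides : List Int) (k : Nat) :
    ALk sides k ++ [sides.getD k 0]
      = ((List.range (k + 1)).filter (fun i => (scanT sides k i).isNone)).map
          (fun i => sides.getD i 0) := by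
  rw [List.range_succ, List.filter_append, List.map_append]
  simp [ALk, List.filter, scanT_self]

-- generic: a filterMap whose function falls back from f to g splits, up to permutation
theorem filterMap_match_perm {α β : Type} (L : List α) (f g : α → Option β) :
    (L.filterMap (fun i => (f i).elim (g i) some)).Perm
      (L.filterMap f ++ L.filterMap (fun i => (f i).elim (g i) (fun _ => none))) := by
  induction L with
  | nil => simp
  | cons x t ih =>
    cases hf : f x with
    | some v => simpa [List.filterMap_cons, hf] using ih.cons v
    | none =>
      cases hg : g x with
      | none => simpa [List.filterMap_cons, hf, hg] using ih
      | some w =>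
        simp only [List.filterMap_cons, hf, hg, Option.elim]
        exact (ih.cons w).trans List.perm_middle.symm

theorem filterMap_of_filter_isNone {α β : Type} (L : List α) (f g : α → Option β) :
    (L.filter (fun a => (f a).isNone)).filterMap g
      = L.filterMap (fun a => (f a).elim (g a) (fun _ => none)) := by
  induction L with
  | nil => simp
  | cons x t ih => cases hf : f x <;> simp [hf, List.filterMap_cons, ih]

theorem filterMap_if_eq_map_filter_map {α β : Type} (L : List α) (v : α → β)
    (q : β → Bool) (h : β → β) :
    L.filterMap (fun a => if q (v a) then some (h (v a)) else none)
      = ((L.map v).filter q).map h := by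
  induction L with
  | nil => simp
  | cons x t ih => cases hq : q (v x) <;> simp [hq, ih]

theorem filterMap_range_eq_of_none {β : Type} (f : Nat → Option β) (m n : Nat) (hmn : m ≤ n)
    (h : ∀ i, m ≤ i → f i = none) :
    (List.range n).filterMap f = (List.range m).filterMap f := by
  induction n with
  | zero => have : m = 0 := by omega
            subst this; rfl
  | succ n ih =>
    rcases Nat.lt_or_ge m (n + 1) with hlt | hge
    · rw [List.range_succ, List.filterMap_append, ih (by omega)]
      simp [h n (by omega)]
    · have : m = n + 1 := by omega
      subst this; rfl

-- min(xs) only depends on the multiset of values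
theorem min?_id_perm (l l' : List Int) (h : l.Perm l') :
    PySem.List.min? l (fun x => x) = PySem.List.min? l' (fun x => x) := by
  cases h1 : PySem.List.min? l (fun x => x) with
  | none =>
    have : l = [] := (PySem.List.min?_eq_none_iff l _).mp h1
    subst this
    rw [(PySem.List.min?_eq_none_iff l' _).mpr (h.nil_eq).symm]
  | some m =>
    cases h2 : PySem.List.min? l' (fun x => x) with
    | none =>
      have : l' = [] := (PySem.List.min?_eq_none_iff l' _).mp h2
      subst this
      have : l = [] := h.eq_nil
      subst this; simp [PySem.List.min?] at h1
    | some m' =>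
      have hm : m ∈ l' := h.mem_iff.mp (PySem.List.min?_mem h1)
      have hm' : m' ∈ l := h.mem_iff.mpr (PySem.List.min?_mem h2)
      have := PySem.List.min?_isMin h1 m' hm'
      have := PySem.List.min?_isMin h2 m hm
      have h3 := PySem.List.min?_isMin h1 m' hm'
      have h4 := PySem.List.min?_isMin h2 m hm
      simp only [Option.some.injEq]
      exact le_antisymm (by simpa using h3) (by simpa using h4)

-- ===== A-side characterization (A = min of the per-side first-hit scans) =====

theorem inner_eq (sides : List Int) (i : Int) :
    ∀ (l : List (Int × Int)) (k : Nat), l = (prL sides).drop k →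
      check_triangles_inner sides i (PySem.List.pyRange ((k : Int) + 1) ((sides.length : Int) - 1) 1)
        = ct_scan (PySem.List.pyGetD sides i 0) l := by
  intro l
  induction l with
  | nil =>
    intro k hk
    have hlen : (prL sides).length ≤ k := by
      by_contra h
      have := (List.drop_eq_nil_iff).mp hk.symm
      omega
    rw [prL_length] at hlen
    rw [PySem.List.pyRange_one_eq_nil (by omega)]
    rfl
  | cons p rest ih =>
    intro k hk
    have hklt : k < (prL sides).length := by
      by_contra h
      rw [List.drop_eq_nil_iff.mpr (by omega)] at hk
      simp at hk
    have hkl2 : k < sides.length - 2 := by have := prL_length sides; omega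
    have hp : p = (prL sides)[k] := by
      have : ((prL sides).drop k)[0]? = some p := by rw [← hk]; rfl
      rw [List.getElem?_drop, List.getElem?_eq_getElem (by omega)] at this
      simpa using this.symm
    have hrest : rest = (prL sides).drop (k + 1) := by
      have h' := congrArg List.tail hk
      rwa [List.tail_cons, List.tail_drop] at h'
    rw [PySem.List.pyRange_one_cons (by omega)]
    show (if check_if_triangle _ _ _ then _ else _) = _
    rw [hp, prL_getElem sides k hklt]
    have hb : PySem.List.pyGetD sides ((k : Int) + 1) 0
        = sides[k + 1]'(by omega) := by
      rw [show ((k : Int) + 1) = ((k + 1 : Nat) : Int) by push_cast; ring,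
        PySem.List.pyGetD_natCast, List.getD_eq_getElem sides 0 (by omega)]
    have hc : PySem.List.pyGetD sides ((k : Int) + 1 + 1) 0
        = sides[k + 2]'(by omega) := by
      rw [show ((k : Int) + 1 + 1) = ((k + 2 : Nat) : Int) by push_cast; ring,
        PySem.List.pyGetD_natCast, List.getD_eq_getElem sides 0 (by omega)]
    rw [hb, hc]
    set a := PySem.List.pyGetD sides i 0 with ha
    set b := sides[k + 1]'(by omega) with hbv
    set c := sides[k + 2]'(by omega) with hcv
    show (if check_if_triangle a b c then some (a + b + c)
          else check_triangles_inner sides i (PySem.List.pyRange ((k : Int) + 1 + 1) ((sides.length : Int) - 1) 1))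
        = (if |c - b| < a ∧ a < b + c then some (a + (b + c)) else ct_scan a rest)
    have habs : (|c - b| < a ∧ a < b + c) ↔ (a + b > c ∧ a + c > b ∧ b + c > a) := by
      rw [abs_lt]; omega
    by_cases h : a + b > c ∧ a + c > b ∧ b + c > a
    · have h1 : check_if_triangle a b c = true := by simp [check_if_triangle, h]
      rw [h1, if_pos rfl, if_pos (habs.mpr h)]
      congr 1; ring
    · have h1 : check_if_triangle a b c = false := by simp [check_if_triangle]; omega
      rw [h1, if_neg (by simp), if_neg (fun hx => h (habs.mp hx))]
      rw [show ((k : Int) + 1 + 1) = ((k + 1 : Nat) : Int) + 1 by push_cast; ring]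
      exact ih (k + 1) hrest

-- building the perimeter list with append-on-hit is a filterMap
theorem perims_eq (sides : List Int) (l : List Int) :
    ∀ (acc : List Int),
      l.foldl (fun acc i =>
          match check_triangles_inner sides i (PySem.List.pyRange (i + 1) ((sides.length : Int) - 1) 1) with
          | some p => acc ++ [p]
          | none => acc) acc
        = acc ++ l.filterMap
            (fun i => check_triangles_inner sides i (PySem.List.pyRange (i + 1) ((sides.length : Int) - 1) 1)) := by
  induction l with
  | nil => intro acc; simp
  | cons x xs ih =>
    intro acc
    cases hx : check_triangles_inner sides x (PySem.List.pyRange (x + 1) ((sides.length : Int) - 1) 1) <;>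
      simp [List.foldl_cons, hx, ih]

-- A's final min_perimeter is just Python min lifted to the empty list
theorem min_perimeter_eq_min? (ps : List Int) :
    min_perimeter ps = PySem.List.min? ps (fun x => x) := by
  match ps with
  | [] => rfl
  | [x] => rfl
  | x :: y :: t =>
    unfold min_perimeter
    rw [if_pos (by simp), if_pos (by simp)]

theorem A_eq_min_Pk (sides : List Int) :
    check_triangles sides = PySem.List.min? (Pk sides (prL sides).length) (fun x => x) := by
  simp only [check_triangles]
  rw [perims_eq, List.nil_append, min_perimeter_eq_min?]
  congr 1
  rw [PySem.List.pyRange_zero_natCast, List.filterMap_map]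
  have step1 : (List.range sides.length).filterMap
      ((fun i => check_triangles_inner sides i
          (PySem.List.pyRange (i + 1) ((sides.length : Int) - 1) 1)) ∘ (fun k : Nat => (k : Int)))
      = (List.range sides.length).filterMap
          (fun i : Nat => ct_scan (sides.getD i 0) ((prL sides).drop i)) := by
    apply List.filterMap_congr
    intro i _
    simp only [Function.comp]
    rw [inner_eq sides (i : Int) ((prL sides).drop i) i rfl, PySem.List.pyGetD_natCast]
  rw [step1]
  rw [filterMap_range_eq_of_none _ (prL sides).length sides.length
      (by have := prL_length sides; omega)
      (fun i hi => by rw [List.drop_eq_nil_iff.mpr hi]; rfl)]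
  apply List.filterMap_congr
  intro i _
  exact (scanT_full sides (prL sides).length i le_rfl).symm

theorem ALk_succ (sides : List Int) (k : Nat) (hk : k < (prL sides).length) :
    ALk sides (k + 1) = (ALk sides k ++ [sides.getD k 0]).filter
        (fun a => !(decide ((prL sides)[k].1 < a) && decide (a < (prL sides)[k].2))) := by
  rw [ALk_snoc, List.filter_map, List.filter_filter]
  unfold ALk
  congr 1
  apply List.filter_congr
  intro i hi
  have hik : i ≤ k := by simp [List.mem_range] at hi; omega
  simp only [Function.comp]
  rw [scanT_succ sides k i hk hik]
  cases hsc : scanT sides k i with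
  | some x => simp
  | none =>
    simp only [Option.isNone_none, Bool.and_true]
    split_ifs with hcond
    · simpa [List.getD] using hcond
    · rw [not_and_or, not_lt, not_lt] at hcond
      simpa [List.getD] using hcond

-- ===== B-side loop invariant =====

theorem bStep_eq (sides : List Int) (k : Nat) (F : List Int) (hk : k < (prL sides).length) :
    bStep sides (ALk sides k, F) ((k : Int) + 1)
      = (ALk sides (k + 1),
         F ++ (((ALk sides k ++ [sides.getD k 0]).filter
             (fun a => decide ((prL sides)[k].1 < a) && decide (a < (prL sides)[k].2))).map
           (fun a => a + (prL sides)[k].2)) ) := by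
  have hl := prL_length sides
  have hk1 : k + 1 < sides.length := by omega
  have hk2 : k + 2 < sides.length := by omega
  simp only [bStep]
  rw [show (k : Int) + 1 - 1 = ((k : Nat) : Int) by ring,
    show (k : Int) + 1 + 1 = ((k + 2 : Nat) : Int) by push_cast; ring,
    show (k : Int) + 1 = ((k + 1 : Nat) : Int) by push_cast; ring,
    PySem.List.pyGetD_natCast, PySem.List.pyGetD_natCast, PySem.List.pyGetD_natCast,
    List.getD_eq_getElem sides 0 hk1, List.getD_eq_getElem sides 0 hk2,
    ALk_succ sides k hk, prL_getElem sides k hk]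

theorem Pk_succ_perm (sides : List Int) (k : Nat) (hk : k < (prL sides).length) :
    (Pk sides (k + 1)).Perm
      (Pk sides k ++ (((ALk sides k ++ [sides.getD k 0]).filter
          (fun a => decide ((prL sides)[k].1 < a) && decide (a < (prL sides)[k].2))).map
        (fun a => a + (prL sides)[k].2))) := by
  have hgk : Pk sides (k + 1) = (List.range (k + 1)).filterMap
      (fun i => (scanT sides k i).elim
        (if decide ((prL sides)[k].1 < sides.getD i 0) && decide (sides.getD i 0 < (prL sides)[k].2) then
            some (sides.getD i 0 + (prL sides)[k].2)
          else none) some) := by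
    unfold Pk
    apply List.filterMap_congr
    intro i hi
    have hik : i ≤ k := by simp [List.mem_range] at hi; omega
    rw [scanT_succ sides k i hk hik]
    cases scanT sides k i with
    | some x => rfl
    | none =>
      by_cases hc : (prL sides)[k].1 < sides.getD i 0 ∧ sides.getD i 0 < (prL sides)[k].2 <;>
        simp
  have e2 : (List.range (k + 1)).filterMap (scanT sides k) = Pk sides k := by
    rw [List.range_succ, List.filterMap_append]
    simp [scanT_self, Pk]
  rw [hgk]
  refine (filterMap_match_perm (List.range (k + 1)) (scanT sides k)
      (fun i => if decide ((prL sides)[k].1 < sides.getD i 0) && decide (sides.getD i 0 < (prL sides)[k].2) then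
          some (sides.getD i 0 + (prL sides)[k].2) else none)).trans (List.Perm.of_eq ?_)
  rw [e2, ← filterMap_of_filter_isNone, filterMap_if_eq_map_filter_map
    (L := (List.range (k + 1)).filter (fun i => (scanT sides k i).isNone))
    (v := fun i => sides.getD i 0)
    (q := fun a => decide ((prL sides)[k].1 < a) && decide (a < (prL sides)[k].2))
    (h := fun a => a + (prL sides)[k].2), ← ALk_snoc]

theorem fold_inv (sides : List Int) :
    ∀ (d k : Nat) (F : List Int), k + d = (prL sides).length → F.Perm (Pk sides k) →
      (((PySem.List.pyRange ((k : Int) + 1) ((sides.length : Int) - 1) 1).foldl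
          (bStep sides) (ALk sides k, F)).2).Perm (Pk sides (prL sides).length) := by
  intro d
  induction d with
  | zero =>
    intro k F hk hF
    have hm : k = (prL sides).length := by omega
    rw [PySem.List.pyRange_one_eq_nil (by have := prL_length sides; omega)]
    simpa [hm] using hF
  | succ d ih =>
    intro k F hk hF
    have hkm : k < (prL sides).length := by omega
    have hn := prL_length sides
    rw [PySem.List.pyRange_one_cons (by omega), List.foldl_cons, bStep_eq sides k F hkm]
    rw [show (k : Int) + 1 + 1 = ((k + 1 : Nat) : Int) + 1 by push_cast; ring]
    exact ih (k + 1) _ (by omega) ((hF.append_right _).trans (Pk_succ_perm sides k hkm).symm)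

-- ===== VERDICT (by name: the statement is the Claim_ definition above) =====
theorem check_triangles_spec : Claim_equal_check_triangles := by
  intro sides _
  unfold Spec_check_triangles
  have hB := fold_inv sides (prL sides).length 0 [] (by simp) (by simp [Pk])
  rw [show ALk sides 0 = ([] : List Int) by simp [ALk]] at hB
  simp only [Nat.cast_zero, zero_add] at hB
  have hBv : check_triangles_alt sides =
      if ((PySem.List.pyRange 1 ((sides.length : Int) - 1) 1).foldl (bStep sides) ([], [])).2 ≠ [] then
        PySem.List.min? ((PySem.List.pyRange 1 ((sides.length : Int) - 1) 1).foldl (bStep sides) ([], [])).2 (fun x => x)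
      else none := rfl
  rw [A_eq_min_Pk, hBv]
  by_cases hFe : ((PySem.List.pyRange 1 ((sides.length : Int) - 1) 1).foldl (bStep sides) ([], [])).2 = []
  · have hP : Pk sides (prL sides).length = [] := by
      have := hFe ▸ hB
      exact this.symm.eq_nil
    simp [hFe, hP, PySem.List.min?]
  · rw [if_pos hFe, min?_id_perm _ _ hB]
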